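-- pv_equiv track=rewrite | github.com/matmirowski/matura-informatyka | python/matura-2021/4.4.py | przesun
-- ===== SOURCE A (Python) =====
-- def przesun(litera,result):
--     ascii_index = ord(litera)
--     if ascii_index == 90:
--         nowa_litera = "A"
--     else:
--         nowa_litera = chr(ascii_index+1)
--
--     for char in result:
--         if char == litera:
--             result_list = list(result)
--             result_list[result.index(litera)] = nowa_litera
--             joiner = ""
--             new_result = joiner.join(result_list)
--             return new_result
--     return result
-- ===== SOURCE B (Python) =====
-- def przesun(litera, result):
--     ascii_index = ord(litera)
--     if ascii_index == 90:
--         nowa_litera = "A"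
--     else:
--         nowa_litera = chr(ascii_index + 1)
--     out = []
--     done = False
--     for ch in result:
--         if not done and ch == litera:
--             out.append(nowa_litera)
--             done = True
--         else:
--             out.append(ch)
--     return "".join(out)
-- ===== Notes on version B (the rewrite author's own statement) =====
-- stated objective: alternative
-- what changed: B is a single left-to-right pass with an accumulator list and a done flag that emits the shifted letter at the first match and copies everything else, instead of A's staged scan-for-membership, list() conversion, second .index() scan, in-place set and join.
import Mathlib
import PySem

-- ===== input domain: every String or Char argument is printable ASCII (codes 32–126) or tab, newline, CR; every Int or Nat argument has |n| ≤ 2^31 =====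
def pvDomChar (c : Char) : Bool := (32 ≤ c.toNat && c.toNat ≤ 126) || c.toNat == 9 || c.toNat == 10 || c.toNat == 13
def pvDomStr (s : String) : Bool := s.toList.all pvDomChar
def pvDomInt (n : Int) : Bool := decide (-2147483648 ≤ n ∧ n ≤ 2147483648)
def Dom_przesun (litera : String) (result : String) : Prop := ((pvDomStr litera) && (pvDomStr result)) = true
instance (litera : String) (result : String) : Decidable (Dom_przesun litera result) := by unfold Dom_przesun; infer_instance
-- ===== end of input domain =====

-- B replaces A's staged scan + list()/.index()/set/join with one single pass carrying a done flag (objective: alternative).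

-- ===== PORT A =====
-- the body of A's found-branch: result_list = list(result); result_list[result.index(litera)] = nowa_litera;
-- return "".join(result_list).  Inside this branch litera occurs in result, so result.index(litera) = result.find(litera).
def pzFoundA (litera : String) (nowaLitera : Char) (result : String) : String :=
  String.ofList (result.toList.set (PySem.Str.find result litera).toNat nowaLitera)

-- 'for char in result: if char == litera: … return …' — scan the characters, first hit takes the branch
def pzLoopA (litera : String) (l nowaLitera : Char) (result : String) : List Char → String
  | [] => result
  | ch :: rest =>
      if ch == l then pzFoundA litera nowaLitera result
      else pzLoopA litera l nowaLitera result rest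

def przesun (litera : String) (result : String) : String :=
  match litera.toList with
  | [l] =>
      -- ascii_index = ord(litera); nowa_litera = "A" if ascii_index == 90 else chr(ascii_index+1)
      let asciiIndex := l.toNat
      let nowaLitera : Char := if asciiIndex == 90 then 'A' else Char.ofNat (asciiIndex + 1)
      pzLoopA litera l nowaLitera result result.toList
  | _ => result   -- ord(litera) raises TypeError here; excluded by Pre_przesun

-- ===== PORT B =====
-- the loop body: 'if not done and ch == litera: out.append(nowa); done = True else: out.append(ch)'
-- state = (out reversed as a cons-accumulator, done)
def pzStepB (l nowa : Char) (st : List Char × Bool) (ch : Char) : List Char × Bool :=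
  if !st.2 && ch == l then (nowa :: st.1, true) else (ch :: st.1, st.2)

def przesun_alt (litera : String) (result : String) : String :=
  match litera.toList with
  | [] => result            -- ord(litera) raises TypeError; excluded by Pre_przesun
  | l :: [] =>
      let asciiIndex := l.toNat
      let nowaLitera : Char := if asciiIndex == 90 then 'A' else Char.ofNat (asciiIndex + 1)
      -- out = []; done = False; for ch in result: …; return "".join(out)
      String.ofList (result.toList.foldl (pzStepB l nowaLitera) ([], false)).1.reverse
  | _ :: _ :: _ => result   -- ord(litera) raises TypeError; excluded by Pre_przesun

-- ===== PRECONDITION & SPEC =====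
-- A raises TypeError in ord(litera) unless litera is a single character; B raises identically.
def Pre_przesun (litera : String) (result : String) : Prop := litera.toList.length = 1
instance (litera : String) (result : String) : Decidable (Pre_przesun litera result) := by unfold Pre_przesun; infer_instance
def pvWitness_przesun : String × String := ("a", "banana")

def Spec_przesun (litera : String) (result : String) (out : String) : Prop := out = przesun_alt litera result
instance (litera : String) (result : String) (out : String) : Decidable (Spec_przesun litera result out) := by unfold Spec_przesun; infer_instance

-- ===== CLAIM (what is proved, stated in full; the proofs are below) =====
def Claim_equal_przesun : Prop := ∀ (litera : String) (result : String), Dom_przesun litera result → Pre_przesun litera result → Spec_przesun litera result (przesun litera result)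

-- ===== LEMMAS AND PROOFS =====

-- replace-first, the value B's one-pass loop computes (proof-only characterisation)
def pzRepl (l nowa : Char) : List Char → List Char
  | [] => []
  | c :: cs => if c == l then nowa :: cs else c :: pzRepl l nowa cs

theorem pzStepB_done (l nowa : Char) (acc : List Char) (cs : List Char) :
    cs.foldl (pzStepB l nowa) (acc, true) = (cs.reverse ++ acc, true) := by
  induction cs generalizing acc with
  | nil => simp
  | cons c cs ih => simp [pzStepB, ih]

theorem pzStepB_repl (l nowa : Char) (acc : List Char) (cs : List Char) :
    (cs.foldl (pzStepB l nowa) (acc, false)).1 = (pzRepl l nowa cs).reverse ++ acc := by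
  induction cs generalizing acc with
  | nil => simp [pzRepl]
  | cons c cs ih =>
      by_cases hc : (c == l) = true
      · simp [pzRepl, pzStepB, hc, pzStepB_done]
      · simp only [List.foldl_cons, pzStepB, Bool.not_false, Bool.true_and, hc,
          pzRepl]
        simpa using ih (c :: acc)

theorem pzRepl_not_mem (l nowa : Char) (cs : List Char) (h : l ∉ cs) :
    pzRepl l nowa cs = cs := by
  induction cs with
  | nil => rfl
  | cons c cs ih =>
      simp only [List.mem_cons, not_or] at h
      have hc : (c == l) = false := beq_eq_false_iff_ne.mpr (fun hc => h.1 hc.symm)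
      simp [pzRepl, hc, ih h.2]

theorem singleton_infix_iff (l : Char) (s : List Char) : [l] <:+: s ↔ l ∈ s := by
  constructor
  · exact fun h => h.mem (List.mem_singleton_self l)
  · intro h
    obtain ⟨p, q, rfl⟩ := List.append_of_mem h
    exact ⟨p, q, by simp⟩

theorem find_eq_of_first (s sub : List Char) (i : Nat)
    (h1 : sub <+: s.drop i) (h2 : ∀ j < i, ¬ sub <+: s.drop j) :
    PySem.Chars.find s sub = (i : Int) := by
  have hinf : sub <:+: s := h1.isInfix.trans (List.drop_suffix i s).isInfix
  have hnn : 0 ≤ PySem.Chars.find s sub := (PySem.Chars.find_nonneg_iff s sub).mpr hinf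
  have hspec := PySem.Chars.find_spec (s := s) (sub := sub) hnn
  have : (PySem.Chars.find s sub).toNat = i := by
    rcases Nat.lt_trichotomy (PySem.Chars.find s sub).toNat i with h | h | h
    · exact absurd hspec.1 (h2 _ h)
    · exact h
    · exact absurd h1 (hspec.2 i h)
  omega

theorem find_cons_self (l : Char) (cs : List Char) :
    PySem.Chars.find (l :: cs) [l] = 0 := by
  refine find_eq_of_first (l :: cs) [l] 0 (by simp) ?_
  intro j hj
  omega

theorem find_cons_ne (c l : Char) (cs : List Char) (hc : c ≠ l) (hm : l ∈ cs) :
    PySem.Chars.find (c :: cs) [l] = PySem.Chars.find cs [l] + 1 := by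
  have hnn : 0 ≤ PySem.Chars.find cs [l] :=
    (PySem.Chars.find_nonneg_iff cs [l]).mpr ((singleton_infix_iff l cs).mpr hm)
  have hspec := PySem.Chars.find_spec (s := cs) (sub := [l]) hnn
  have h1 : [l] <+: (c :: cs).drop ((PySem.Chars.find cs [l]).toNat + 1) := by
    simpa using hspec.1
  have h2 : ∀ j < (PySem.Chars.find cs [l]).toNat + 1, ¬ [l] <+: (c :: cs).drop j := by
    intro j hj
    cases j with
    | zero =>
        intro hp
        obtain ⟨t, ht⟩ := hp
        simp only [List.drop_zero, List.singleton_append] at ht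
        exact hc (List.cons.injEq l t c cs ▸ ht).1.symm
    | succ k =>
        simpa using hspec.2 k (by omega)
  have h := find_eq_of_first (c :: cs) [l] ((PySem.Chars.find cs [l]).toNat + 1) h1 h2
  rw [h]; omega

theorem pzRepl_eq_set (l nowa : Char) (cs : List Char) (h : l ∈ cs) :
    pzRepl l nowa cs = cs.set (PySem.Chars.find cs [l]).toNat nowa := by
  induction cs with
  | nil => cases h
  | cons c cs ih =>
      by_cases hc : c = l
      · subst hc
        simp [pzRepl, find_cons_self]
      · have hm : l ∈ cs := by
          rcases List.mem_cons.mp h with h1 | h2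
          · exact absurd h1.symm hc
          · exact h2
        have hcf : (c == l) = false := beq_eq_false_iff_ne.mpr hc
        have hnn : 0 ≤ PySem.Chars.find cs [l] :=
          (PySem.Chars.find_nonneg_iff cs [l]).mpr ((singleton_infix_iff l cs).mpr hm)
        simp only [pzRepl, hcf, Bool.false_eq_true, if_false, find_cons_ne c l cs hc hm,
          ih hm]
        have ht : (PySem.Chars.find cs [l] + 1).toNat = (PySem.Chars.find cs [l]).toNat + 1 := by
          omega
        rw [ht, List.set_cons_succ]

theorem pzLoopA_not_mem (litera : String) (l nowaLitera : Char) (result : String)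
    (rest : List Char) (h : l ∉ rest) :
    pzLoopA litera l nowaLitera result rest = result := by
  induction rest with
  | nil => rfl
  | cons ch rest ih =>
      simp only [List.mem_cons, not_or] at h
      have hc : (ch == l) = false := beq_eq_false_iff_ne.mpr (fun hc => h.1 hc.symm)
      simp only [pzLoopA, hc, Bool.false_eq_true, if_false]
      exact ih h.2

theorem pzLoopA_mem (litera : String) (l nowaLitera : Char) (result : String)
    (rest : List Char) (h : l ∈ rest) :
    pzLoopA litera l nowaLitera result rest = pzFoundA litera nowaLitera result := by
  induction rest with
  | nil => cases h
  | cons ch rest ih =>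
      by_cases hc : ch = l
      · simp only [pzLoopA, hc, BEq.rfl, if_true]
      · rcases List.mem_cons.mp h with h1 | h2
        · exact absurd h1.symm hc
        · have hcf : (ch == l) = false := beq_eq_false_iff_ne.mpr hc
          simp only [pzLoopA, hcf, Bool.false_eq_true, if_false]
          exact ih h2

theorem przesun_spec_aux (litera : String) (result : String)
    (h : Pre_przesun litera result) : przesun litera result = przesun_alt litera result := by
  unfold Pre_przesun at h
  obtain ⟨l, hl⟩ : ∃ l, litera.toList = [l] := by
    cases hlt : litera.toList with
    | nil => simp [hlt] at h
    | cons a t =>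
        cases t with
        | nil => exact ⟨a, rfl⟩
        | cons b t' => simp [hlt] at h
  unfold przesun przesun_alt
  rw [hl]
  set nowa : Char := if (l.toNat == 90) = true then 'A' else Char.ofNat (l.toNat + 1) with hn
  show pzLoopA litera l nowa result result.toList =
    String.ofList (result.toList.foldl (pzStepB l nowa) ([], false)).1.reverse
  rw [pzStepB_repl l nowa [] result.toList]
  by_cases hmem : l ∈ result.toList
  · rw [pzLoopA_mem litera l nowa result result.toList hmem]
    have hfe : PySem.Str.find result litera = PySem.Chars.find result.toList [l] := by
      simp [hl]
    simp [pzFoundA, hl, pzRepl_eq_set l nowa result.toList hmem]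
  · rw [pzLoopA_not_mem litera l nowa result result.toList hmem,
        pzRepl_not_mem l nowa result.toList hmem]
    simp

-- ===== VERDICT (by name: the statement is the Claim_ definition above) =====
theorem przesun_spec : Claim_equal_przesun := by
  intro litera result _ hpre
  exact przesun_spec_aux litera result hpre
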